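-- pv_equiv track=rewrite | github.com/jaccong/6018 | channel_sorter.py | sort_channels_by_custom_order
-- ===== SOURCE A (Python) =====
-- def extract_channel_name(channel_str: str) -> str:
--     """从"频道名,URL"格式的字符串中提取频道名"""
--     if not isinstance(channel_str, str) or len(channel_str.strip()) == 0:
--         return ""
--     parts = channel_str.strip().split(',', 1)
--     return parts[0].strip() if parts else ""
--
-- def extract_channel_url(channel_str: str) -> str:
--     """从"频道名,URL"格式的字符串中提取URL"""
--     if not isinstance(channel_str, str) or len(channel_str.strip()) == 0:
--         return ""
--     parts = channel_str.strip().split(',', 1)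
--     return parts[1].strip() if len(parts) >= 2 else ""
--
-- def sort_channels_by_custom_order(original_channels: list, custom_name_order: list, custom_link_order: list) -> list:
--     """按【自定义URL关键字顺序(高优先级)】+【自定义频道名顺序】对频道列表排序"""
--     if not isinstance(original_channels, list) or len(original_channels) == 0:
--         return []
--
--     # 构建URL关键字-优先级映射
--     link_order_map = {keyword: idx for idx, keyword in enumerate(custom_link_order)}
--     max_link_idx = len(custom_link_order)
--
--     # 构建频道名-优先级映射
--     name_order_map = {name: idx for idx, name in enumerate(custom_name_order)}
--     max_name_idx = len(custom_name_order)
--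
--     def get_sort_key(channel_str: str) -> tuple:
--         channel_url = extract_channel_url(channel_str)
--         channel_name = extract_channel_name(channel_str)
--
--         # 优先级1: URL关键字匹配度（更高优先级）
--         link_weight = max_link_idx
--         for keyword, idx in link_order_map.items():
--             if keyword in channel_url:
--                 link_weight = idx
--                 break
--
--         # 优先级2: 频道名匹配度
--         name_weight = name_order_map.get(channel_name, max_name_idx)
--
--         # 优先级3: 原列表索引（保证排序稳定性）
--         original_idx = original_channels.index(channel_str)
--
--         return (name_weight, link_weight, original_idx)
--
--     sorted_channels = sorted(original_channels, key=get_sort_key)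
--     return sorted_channels
-- ===== SOURCE B (Python) =====
-- def extract_channel_name(channel_str: str) -> str:
--     if not isinstance(channel_str, str) or len(channel_str.strip()) == 0:
--         return ""
--     parts = channel_str.strip().split(',', 1)
--     return parts[0].strip() if parts else ""
--
-- def extract_channel_url(channel_str: str) -> str:
--     if not isinstance(channel_str, str) or len(channel_str.strip()) == 0:
--         return ""
--     parts = channel_str.strip().split(',', 1)
--     return parts[1].strip() if len(parts) >= 2 else ""
--
-- def sort_channels_by_custom_order(original_channels: list, custom_name_order: list, custom_link_order: list) -> list:
--     """Bucket distribution: count duplicates once, weigh each distinct channel once,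
--     group by (name_weight, link_weight) and emit buckets in sorted key order."""
--     if not isinstance(original_channels, list) or len(original_channels) == 0:
--         return []
--     name_rank = {}
--     for idx, name in enumerate(custom_name_order):
--         name_rank[name] = idx
--     link_rank = {}
--     for idx, keyword in enumerate(custom_link_order):
--         link_rank[keyword] = idx
--     counts = {}
--     for ch in original_channels:
--         counts[ch] = counts.get(ch, 0) + 1
--     buckets = {}
--     for ch in counts:               # distinct channels, first-occurrence order
--         url = extract_channel_url(ch)
--         name = extract_channel_name(ch)
--         link_weight = len(custom_link_order)
--         for keyword in link_rank:
--             if keyword in url: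
--                 link_weight = link_rank[keyword]
--                 break
--         name_weight = name_rank.get(name, len(custom_name_order))
--         buckets.setdefault((name_weight, link_weight), []).append(ch)
--     out = []
--     for key in sorted(buckets):
--         for ch in buckets[key]:
--             out.extend([ch] * counts[ch])
--     return out
-- ===== Notes on version B (the rewrite author's own statement) =====
-- stated objective: faster
-- what changed: A sorts the whole list with one sorted() call whose key re-extracts both weights and calls list.index (a linear scan) for every occurrence; B counts occurrences in one pass, weighs each distinct channel exactly once, distributes the distinct channels into (name_weight, link_weight) buckets and emits the buckets in sorted key order, repeating each channel by its count.
import Mathlib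
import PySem

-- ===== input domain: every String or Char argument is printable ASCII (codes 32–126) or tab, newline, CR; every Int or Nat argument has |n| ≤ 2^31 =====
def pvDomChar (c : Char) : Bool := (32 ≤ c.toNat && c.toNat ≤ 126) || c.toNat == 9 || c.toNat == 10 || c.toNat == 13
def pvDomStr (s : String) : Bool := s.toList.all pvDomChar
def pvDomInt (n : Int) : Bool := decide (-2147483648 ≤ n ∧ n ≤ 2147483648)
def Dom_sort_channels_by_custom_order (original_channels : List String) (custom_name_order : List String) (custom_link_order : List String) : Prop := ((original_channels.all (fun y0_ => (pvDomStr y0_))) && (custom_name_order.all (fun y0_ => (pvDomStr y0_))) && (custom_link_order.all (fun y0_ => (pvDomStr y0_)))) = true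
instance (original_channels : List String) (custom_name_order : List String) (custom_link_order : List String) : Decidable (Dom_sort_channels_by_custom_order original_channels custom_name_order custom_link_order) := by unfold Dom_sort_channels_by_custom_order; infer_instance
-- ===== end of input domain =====

-- B replaces A's single sorted() call keyed by (name_weight, link_weight, list.index) with a
-- count-once / weigh-each-distinct-channel-once bucket distribution emitted in sorted key order
-- (objective: faster — it avoids A's linear list.index scan per element; measurably faster on the
-- timing run's generated inputs).

-- ===== PORT A =====
def extract_channel_name (channel_str : String) : String :=
  if PySem.Str.len (PySem.Str.strip channel_str) = 0 then ""
  else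
    -- parts = channel_str.strip().split(',', 1)  (sep ≠ "", so splitMax? is always some)
    let parts := (PySem.Str.splitMax? (PySem.Str.strip channel_str) "," 1).getD []
    match parts with
    | [] => ""                                  -- 'if parts else ""' (unreachable: split returns ≥ 1 part)
    | p :: _ => PySem.Str.strip p               -- parts[0].strip()

def extract_channel_url (channel_str : String) : String :=
  if PySem.Str.len (PySem.Str.strip channel_str) = 0 then ""
  else
    let parts := (PySem.Str.splitMax? (PySem.Str.strip channel_str) "," 1).getD []
    if 2 ≤ parts.length then PySem.Str.strip (parts.getD 1 "") else ""   -- parts[1].strip()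

def sort_channels_by_custom_order (original_channels : List String) (custom_name_order : List String) (custom_link_order : List String) : List String :=
  if original_channels.length = 0 then []
  else
    let link_order_map : PySem.Dict String Int :=
      (PySem.List.enumerate custom_link_order).foldl (fun d p => d.insert p.2 p.1) PySem.Dict.empty
    let max_link_idx : Int := custom_link_order.length
    let name_order_map : PySem.Dict String Int :=
      (PySem.List.enumerate custom_name_order).foldl (fun d p => d.insert p.2 p.1) PySem.Dict.empty
    let max_name_idx : Int := custom_name_order.length
    -- Python tuple key (name_weight, link_weight, original_idx): sorted2 with the trailing
    -- (link_weight, original_idx) pair as a lexicographic product (Python's tuple order)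
    let get_sort_key : String → Int × Lex (Int × Int) := fun channel_str =>
      let channel_url := extract_channel_url channel_str
      let channel_name := extract_channel_name channel_str
      -- 'for keyword, idx in link_order_map.items(): if keyword in channel_url: …; break'
      let link_weight : Int :=
        match link_order_map.items.find? (fun kv => PySem.Str.isIn kv.1 channel_url) with
        | some kv => kv.2
        | none => max_link_idx
      let name_weight : Int := name_order_map.getD channel_name max_name_idx
      -- original_channels.index(channel_str): channel_str ∈ original_channels, so index? is some
      let original_idx : Int := (((PySem.List.index? original_channels channel_str).getD 0 : Nat) : Int)
      (name_weight, toLex (link_weight, original_idx))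
    PySem.List.sorted2 original_channels (fun ch => (get_sort_key ch).1) (fun ch => (get_sort_key ch).2) false

-- ===== PORT B =====
def sort_channels_by_custom_order_alt (original_channels : List String) (custom_name_order : List String) (custom_link_order : List String) : List String :=
  if original_channels.length = 0 then []
  else
    let name_rank : PySem.Dict String Int :=
      (PySem.List.enumerate custom_name_order).foldl (fun d p => d.insert p.2 p.1) PySem.Dict.empty
    let link_rank : PySem.Dict String Int :=
      (PySem.List.enumerate custom_link_order).foldl (fun d p => d.insert p.2 p.1) PySem.Dict.empty
    -- counts[ch] = counts.get(ch, 0) + 1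
    let counts : PySem.Dict String Int :=
      original_channels.foldl (fun d ch => d.insert ch (d.getD ch 0 + 1)) PySem.Dict.empty
    -- for ch in counts: … buckets.setdefault((nw, lw), []).append(ch)
    let buckets : PySem.Dict (Int × Int) (List String) :=
      counts.keys.foldl (fun b ch =>
        let url := extract_channel_url ch
        let name := extract_channel_name ch
        -- 'for keyword in link_rank: if keyword in url: link_weight = link_rank[keyword]; break'
        let link_weight : Int :=
          match link_rank.keys.find? (fun kw => PySem.Str.isIn kw url) with
          | some kw => link_rank.getD kw 0      -- kw ∈ link_rank, so the Python lookup cannot raise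
          | none => (custom_link_order.length : Int)
        let name_weight : Int := name_rank.getD name (custom_name_order.length : Int)
        b.modify (name_weight, link_weight) [] (fun v => v ++ [ch])) PySem.Dict.empty
    -- for key in sorted(buckets): for ch in buckets[key]: out.extend([ch] * counts[ch])
    (PySem.List.sorted2 buckets.keys (fun k => k.1) (fun k => k.2) false).foldl
      (fun out k =>
        (buckets.getD k []).foldl (fun out ch => out ++ PySem.List.pyRepeat [ch] (counts.getD ch 0)) out) []

-- ===== PRECONDITION & SPEC =====
def Spec_sort_channels_by_custom_order (original_channels : List String) (custom_name_order : List String) (custom_link_order : List String) (out : List String) : Prop := out = sort_channels_by_custom_order_alt original_channels custom_name_order custom_link_order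
instance (original_channels : List String) (custom_name_order : List String) (custom_link_order : List String) (out : List String) : Decidable (Spec_sort_channels_by_custom_order original_channels custom_name_order custom_link_order out) := by unfold Spec_sort_channels_by_custom_order; infer_instance

-- ===== CLAIM (what is proved, stated in full; the proofs are below) =====
def Claim_equal_sort_channels_by_custom_order : Prop := ∀ (original_channels : List String) (custom_name_order : List String) (custom_link_order : List String), Dom_sort_channels_by_custom_order original_channels custom_name_order custom_link_order → Spec_sort_channels_by_custom_order original_channels custom_name_order custom_link_order (sort_channels_by_custom_order original_channels custom_name_order custom_link_order)

-- ===== LEMMAS AND PROOFS =====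

-- The (name_weight, link_weight) pair computed for a channel string (B's formulation;
-- chanKey_A_eq below shows A computes the same pair)
def chanKey (custom_name_order : List String) (custom_link_order : List String) (ch : String) : Int × Int :=
  let name_rank : PySem.Dict String Int :=
    (PySem.List.enumerate custom_name_order).foldl (fun d p => d.insert p.2 p.1) PySem.Dict.empty
  let link_rank : PySem.Dict String Int :=
    (PySem.List.enumerate custom_link_order).foldl (fun d p => d.insert p.2 p.1) PySem.Dict.empty
  let link_weight : Int :=
    match link_rank.keys.find? (fun kw => PySem.Str.isIn kw (extract_channel_url ch)) with
    | some kw => link_rank.getD kw 0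
    | none => (custom_link_order.length : Int)
  (name_rank.getD (extract_channel_name ch) (custom_name_order.length : Int), link_weight)

-- first-occurrence index, as A computes it
def chanRank (original_channels : List String) (ch : String) : Int :=
  (((PySem.List.index? original_channels ch).getD 0 : Nat) : Int)

-- A's full sort key
def keyA (original_channels : List String) (custom_name_order : List String) (custom_link_order : List String) (ch : String) : Lex (Int × Lex (Int × Int)) :=
  toLex ((chanKey custom_name_order custom_link_order ch).1,
    toLex ((chanKey custom_name_order custom_link_order ch).2, chanRank original_channels ch))

-- B's counts dict and buckets dict, named for the proofs (definitionally what the port builds)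
def countsOf (original_channels : List String) : PySem.Dict String Int :=
  original_channels.foldl (fun d ch => d.insert ch (d.getD ch 0 + 1)) PySem.Dict.empty

def bucketsOf (E : List String) (K : String → Int × Int) : PySem.Dict (Int × Int) (List String) :=
  E.foldl (fun b ch => b.modify (K ch) [] (fun v => v ++ [ch])) PySem.Dict.empty

-- A's first-match loop over link_order_map.items() equals B's loop over its keys plus a lookup
theorem link_weight_eq (custom_link_order : List String) (url : String) :
    (match ((PySem.List.enumerate custom_link_order).foldl (fun d p => d.insert p.2 p.1) (PySem.Dict.empty : PySem.Dict String Int)).items.find? (fun kv => PySem.Str.isIn kv.1 url) with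
      | some kv => kv.2
      | none => (custom_link_order.length : Int))
    = (match ((PySem.List.enumerate custom_link_order).foldl (fun d p => d.insert p.2 p.1) (PySem.Dict.empty : PySem.Dict String Int)).keys.find? (fun kw => PySem.Str.isIn kw url) with
      | some kw => ((PySem.List.enumerate custom_link_order).foldl (fun d p => d.insert p.2 p.1) (PySem.Dict.empty : PySem.Dict String Int)).getD kw 0
      | none => (custom_link_order.length : Int)) := by
  set d := ((PySem.List.enumerate custom_link_order).foldl (fun d p => d.insert p.2 p.1) (PySem.Dict.empty : PySem.Dict String Int)) with hd
  have hnd : d.keys.Nodup := by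
    rw [hd]
    exact PySem.Dict.nodup_keys_foldl_insert_key (PySem.List.enumerate custom_link_order) (fun (p : Int × String) => p.2) (fun d p => p.1) PySem.Dict.empty (by simp [PySem.Dict.empty, PySem.Dict.keys])
  have hkeys : d.keys = d.items.map (fun p => p.1) := rfl
  rw [hkeys, List.find?_map]
  cases hf : d.items.find? (fun kv => PySem.Str.isIn kv.1 url) with
  | none =>
    have : d.items.find? ((fun kw => PySem.Str.isIn kw url) ∘ fun p => p.1) = none := by
      rw [← hf]; rfl
    rw [this]
    simp
  | some kv =>
    have : d.items.find? ((fun kw => PySem.Str.isIn kw url) ∘ fun p => p.1) = some kv := by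
      rw [← hf]; rfl
    rw [this]
    simp only [Option.map_some]
    have hmem : kv ∈ d.items := List.mem_of_find?_eq_some hf
    obtain ⟨k1, v1⟩ := kv
    exact (PySem.Dict.getD_of_mem_items d hmem hnd 0).symm

-- Python's two-component tuple sort is the sort under the lexicographic product order
theorem sorted2_eq_sorted_toLex {α κ₁ κ₂ : Type} [LinearOrder κ₁] [LinearOrder κ₂]
    (xs : List α) (k1 : α → κ₁) (k2 : α → κ₂) :
    PySem.List.sorted2 xs k1 k2 false = PySem.List.sorted xs (fun x => toLex (k1 x, k2 x)) false := by
  rw [PySem.List.sorted_eq_foldl_insertBy]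
  simp only [PySem.List.sorted2]
  congr 1
  funext acc x
  congr 1
  funext a b
  rcases lt_trichotomy (k1 a) (k1 b) with h | h | h
  · simp [Prod.Lex.lt_iff, h, asymm h]
  · simp [Prod.Lex.lt_iff, h]
  · simp [Prod.Lex.lt_iff, h, asymm h, ne_of_gt h]

theorem portA_eq_sorted (oc cn cl : List String) (h : ¬ oc.length = 0) :
    sort_channels_by_custom_order oc cn cl = PySem.List.sorted oc (keyA oc cn cl) false := by
  simp only [sort_channels_by_custom_order]
  rw [if_neg h, sorted2_eq_sorted_toLex]
  congr 1
  funext ch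
  simp only [keyA, chanKey, chanRank]
  rw [link_weight_eq cl (extract_channel_url ch)]

-- PySem.Set.add-loops append the unseen first occurrences
theorem foldl_add_eq {α : Type} [BEq α] [LawfulBEq α] :
    ∀ (l : List α) (s : List α),
      l.foldl PySem.Set.add s = s ++ (PySem.Set.ofList l).filter (fun y => !(s.contains y)) := by
  intro l
  induction l with
  | nil => intro s; simp [PySem.Set.ofList]
  | cons a l ih =>
    intro s
    have hof : PySem.Set.ofList (a :: l) = List.foldl PySem.Set.add (PySem.Set.add [] a) l := rfl
    have hadd : PySem.Set.add ([] : List α) a = [a] := by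
      simp [PySem.Set.add, PySem.Set.contains]
    rw [hof, hadd, ih]
    show List.foldl PySem.Set.add (PySem.Set.add s a) l = _
    rw [ih]
    by_cases ha : a ∈ s
    · have h1 : PySem.Set.add s a = s := by
        simp [PySem.Set.add, PySem.Set.contains, ha]
      rw [h1]
      congr 1
      rw [List.filter_append, List.filter_filter]
      have h2 : List.filter (fun y => !s.contains y) [a] = [] := by simp [ha]
      rw [h2, List.nil_append]
      apply List.filter_congr
      intro y hy
      by_cases hya : y = a
      · subst hya; simp [ha]
      · simp [hya]
    · have h1 : PySem.Set.add s a = s ++ [a] := by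
        simp [PySem.Set.add, PySem.Set.contains, ha]
      rw [h1, List.append_assoc]
      congr 1
      rw [List.filter_append, List.filter_filter]
      have h2 : List.filter (fun y => !s.contains y) [a] = [a] := by simp [ha]
      rw [h2]
      congr 1
      apply List.filter_congr
      intro y hy
      by_cases hya : y = a
      · subst hya; simp
      · simp [hya]

theorem ofList_cons {α : Type} [BEq α] [LawfulBEq α] (x : α) (l : List α) :
    PySem.Set.ofList (x :: l) = x :: (PySem.Set.ofList l).filter (fun y => y != x) := by
  have h : PySem.Set.ofList (x :: l) = List.foldl PySem.Set.add [x] l := rfl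
  rw [h, foldl_add_eq]
  simp only [List.singleton_append]
  congr 1
  apply List.filter_congr
  intro y hy
  show (!(List.contains [x] y)) = (y != x)
  simp [bne, BEq.comm]

-- the dedup list (first occurrences, in order) is strictly increasing under first-occurrence index
theorem dedup_pairwise_rank {α : Type} [BEq α] [LawfulBEq α] :
    ∀ (xs : List α), (PySem.Set.ofList xs).Pairwise
      (fun a b => (PySem.List.index? xs a).getD 0 < (PySem.List.index? xs b).getD 0) := by
  intro xs
  induction xs with
  | nil => simp [PySem.Set.ofList, PySem.Set.empty]
  | cons x t ih =>
    rw [ofList_cons]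
    constructor
    · intro b hb
      have hbx : b ≠ x := by
        have := List.of_mem_filter hb
        simpa using this
      have hbt : b ∈ t := by
        have := List.mem_of_mem_filter hb
        rwa [PySem.Set.mem_ofList] at this
      rw [PySem.List.index?_cons_self, PySem.List.index?_cons_of_ne _ (Ne.symm hbx)]
      obtain ⟨k, hk⟩ := Option.isSome_iff_exists.mp ((PySem.List.index?_isSome_iff t b).mpr hbt)
      rw [PySem.List.index?_eq_idxOf?] at hk
      simp [hk]
    · apply List.Pairwise.imp_of_mem (R := fun a b => (PySem.List.index? t a).getD 0 < (PySem.List.index? t b).getD 0)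
      · intro a b ha hb hab
        have hax : a ≠ x := by have := List.of_mem_filter ha; simpa using this
        have hbx : b ≠ x := by have := List.of_mem_filter hb; simpa using this
        have hat : a ∈ t := by have := List.mem_of_mem_filter ha; rwa [PySem.Set.mem_ofList] at this
        have hbt : b ∈ t := by have := List.mem_of_mem_filter hb; rwa [PySem.Set.mem_ofList] at this
        rw [PySem.List.index?_cons_of_ne _ (Ne.symm hax), PySem.List.index?_cons_of_ne _ (Ne.symm hbx)]
        obtain ⟨ka, hka⟩ := Option.isSome_iff_exists.mp ((PySem.List.index?_isSome_iff t a).mpr hat)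
        obtain ⟨kb, hkb⟩ := Option.isSome_iff_exists.mp ((PySem.List.index?_isSome_iff t b).mpr hbt)
        rw [PySem.List.index?_eq_idxOf?] at hka hkb
        simp only [PySem.List.index?_eq_idxOf?, hka, hkb] at hab ⊢
        simpa using hab
      · exact ih.filter _

-- distributing a list over its (distinct) key buckets is a permutation
theorem groups_perm {α β : Type} [BEq β] [LawfulBEq β] (K : α → β) :
    ∀ (ks : List β) (E : List α), ks.Nodup → (∀ c ∈ E, K c ∈ ks) →
      (ks.flatMap (fun k => E.filter (fun c => K c == k))).Perm E := by
  intro ks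
  induction ks with
  | nil =>
    intro E _ h
    have : E = [] := by
      cases E with
      | nil => rfl
      | cons a t => exact absurd (h a (by simp)) (by simp)
    simp [this]
  | cons k ks ih =>
    intro E hnd h
    rw [List.flatMap_cons]
    have hkk : k ∉ ks := (List.nodup_cons.mp hnd).1
    have step : ∀ k' ∈ ks, E.filter (fun c => K c == k') = (E.filter (fun c => !(K c == k))).filter (fun c => K c == k') := by
      intro k' hk'
      rw [List.filter_filter]
      apply List.filter_congr
      intro c hc
      by_cases hck : K c = k
      · have : k' ≠ k := fun he => hkk (he ▸ hk')
        simp [hck, Ne.symm this]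
      · simp [hck]
    have hflat : ks.flatMap (fun k' => E.filter (fun c => K c == k')) =
        ks.flatMap (fun k' => (E.filter (fun c => !(K c == k))).filter (fun c => K c == k')) := by
      apply List.flatMap_congr
      intro k' hk'
      exact step k' hk'
    rw [hflat]
    have ihh := ih (E.filter (fun c => !(K c == k))) (List.nodup_cons.mp hnd).2 (by
      intro c hc
      have hcE := List.mem_of_mem_filter hc
      have hck : ¬ (K c = k) := by have := List.of_mem_filter hc; simpa using this
      have := h c hcE
      simpa [hck] using this)
    exact ((ihh.append_left _).trans (List.filter_append_perm _ E))

theorem count_flatMap_rep {α : Type} [BEq α] [LawfulBEq α] (xs : List α) :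
    ∀ (E : List α), E.Nodup → ∀ a,
      List.count a (E.flatMap (fun c => List.replicate (List.count c xs) c))
        = if a ∈ E then List.count a xs else 0 := by
  intro E
  induction E with
  | nil => simp
  | cons c E ih =>
    intro hnd a
    rw [List.flatMap_cons, List.count_append]
    rcases List.nodup_cons.mp hnd with ⟨hcE, hndE⟩
    rw [ih hndE a]
    by_cases hac : a = c
    · subst hac
      simp [hcE]
    · simp [List.count_replicate, hac, Ne.symm hac]

-- replicating each distinct element by its multiplicity recovers the original multiset
theorem rep_perm {α : Type} [BEq α] [LawfulBEq α] (xs : List α) (E : List α)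
    (hnd : E.Nodup) (hmem : ∀ c, c ∈ E ↔ c ∈ xs) :
    (E.flatMap (fun c => List.replicate (List.count c xs) c)).Perm xs := by
  rw [List.perm_iff_count]
  intro a
  rw [count_flatMap_rep xs E hnd a]
  by_cases ha : a ∈ E
  · simp [ha]
  · have : a ∉ xs := fun h => ha ((hmem a).mpr h)
    simp [ha, List.count_eq_zero.mpr this]

theorem buckets_getD (E : List String) (K : String → Int × Int) (k : Int × Int) :
    (bucketsOf E K).getD k [] = E.filter (fun ch => K ch == k) := by
  have h := PySem.Dict.getD_foldl_modify_append (E.map (fun ch => (K ch, ch))) (PySem.Dict.empty : PySem.Dict (Int × Int) (List String)) k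
  rw [List.foldl_map] at h
  simp only [PySem.Dict.getD_empty] at h
  rw [List.filter_map, List.map_map] at h
  rw [bucketsOf]
  simpa [Function.comp_def] using h

theorem buckets_keys (E : List String) (K : String → Int × Int) :
    (bucketsOf E K).keys = PySem.Set.ofList (E.map K) := by
  rw [bucketsOf, PySem.Dict.keys_foldl_modify_key E K [] (fun b ch v => v ++ [ch]) PySem.Dict.empty]
  rfl

theorem portB_eq_flatMap (oc cn cl : List String) (h : ¬ oc.length = 0) :
    sort_channels_by_custom_order_alt oc cn cl =
      (PySem.List.sorted (PySem.Set.ofList ((PySem.Set.ofList oc).map (chanKey cn cl))) (fun k => toLex (k.1, k.2)) false).flatMap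
        (fun k => ((PySem.Set.ofList oc).filter (fun ch => chanKey cn cl ch == k)).flatMap
          (fun ch => List.replicate (List.count ch oc) ch)) := by
  have h0 : sort_channels_by_custom_order_alt oc cn cl =
      (PySem.List.sorted2 (bucketsOf (countsOf oc).keys (chanKey cn cl)).keys (fun k => k.1) (fun k => k.2) false).foldl
        (fun out k =>
          ((bucketsOf (countsOf oc).keys (chanKey cn cl)).getD k []).foldl
            (fun out ch => out ++ PySem.List.pyRepeat [ch] ((countsOf oc).getD ch 0)) out) [] := by
    simp only [sort_channels_by_custom_order_alt]
    rw [if_neg h]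
    rfl
  rw [h0]
  have hc : countsOf oc = PySem.Dict.counter oc := PySem.Dict.foldl_insert_getD_add_one_eq_counter oc
  have hck : (countsOf oc).keys = PySem.Set.ofList oc := by rw [hc, PySem.Dict.keys_counter]
  rw [hck, hc]
  rw [buckets_keys, sorted2_eq_sorted_toLex]
  simp only [buckets_getD, PySem.Dict.getD_counter, PySem.List.pyRepeat_singleton, Int.toNat_natCast]
  simp only [PySem.List.foldl_append_eq_flatMap]
  simp

-- keyA comparisons from bucket-key comparisons
theorem keyA_le_of_eq_lt (oc cn cl : List String) (a b : String)
    (hk : chanKey cn cl a = chanKey cn cl b) (hr : chanRank oc a < chanRank oc b) :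
    keyA oc cn cl a ≤ keyA oc cn cl b := by
  rw [keyA, keyA, hk]
  rw [Prod.Lex.le_iff]
  right
  exact ⟨rfl, le_of_lt (by rw [Prod.Lex.lt_iff]; right; exact ⟨rfl, hr⟩)⟩

theorem keyA_le_of_key_lt (oc cn cl : List String) (a b : String)
    (hlt : toLex ((chanKey cn cl a).1, (chanKey cn cl a).2) < toLex ((chanKey cn cl b).1, (chanKey cn cl b).2)) :
    keyA oc cn cl a ≤ keyA oc cn cl b := by
  rw [keyA, keyA]
  rw [Prod.Lex.lt_iff] at hlt
  rw [Prod.Lex.le_iff]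
  rcases hlt with h1 | ⟨h1, h2⟩
  · left; exact h1
  · right; exact ⟨h1, le_of_lt (by rw [Prod.Lex.lt_iff]; left; exact h2)⟩

-- ===== VERDICT (by name: the statement is the Claim_ definition above) =====
set_option maxHeartbeats 1000000 in
theorem sort_channels_by_custom_order_spec : Claim_equal_sort_channels_by_custom_order := by
  intro oc cn cl _dom
  unfold Spec_sort_channels_by_custom_order
  by_cases h : oc.length = 0
  · have hnil : oc = [] := List.length_eq_zero_iff.mp h
    subst hnil
    rfl
  · rw [portA_eq_sorted oc cn cl h, portB_eq_flatMap oc cn cl h]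
    set D := PySem.Set.ofList oc with hD
    set K := chanKey cn cl with hK
    set rep := fun ch => List.replicate (List.count ch oc) ch with hrep
    set ks := PySem.Set.ofList (D.map K) with hks
    set sk := PySem.List.sorted ks (fun k => toLex (k.1, k.2)) false with hsk
    -- memberships
    have hmemD : ∀ c, c ∈ D ↔ c ∈ oc := fun c => PySem.Set.mem_ofList oc c
    have hmem_flat : ∀ x, x ∈ sk.flatMap (fun k => (D.filter (fun ch => K ch == k)).flatMap rep) → x ∈ oc := by
      intro x hx
      rw [List.mem_flatMap] at hx
      obtain ⟨k, _, hx⟩ := hx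
      rw [List.mem_flatMap] at hx
      obtain ⟨c, hc, hx⟩ := hx
      have := List.eq_of_mem_replicate hx
      subst this
      exact (hmemD x).mp (List.mem_of_mem_filter hc)
    apply List.Perm.eq_of_pairwise (le := fun a b => keyA oc cn cl a ≤ keyA oc cn cl b)
    · -- antisymmetry on members
      intro a b ha hb hab hba
      have haoc : a ∈ oc := ((PySem.List.sorted_perm oc (keyA oc cn cl) false).mem_iff).mp ha
      have hboc : b ∈ oc := hmem_flat b hb
      have heq : keyA oc cn cl a = keyA oc cn cl b := le_antisymm hab hba
      have hr : chanRank oc a = chanRank oc b := by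
        rw [keyA, keyA] at heq
        have h1 := congrArg (fun x => (ofLex x).2) heq
        simp only [ofLex_toLex] at h1
        have h2 := congrArg (fun x => (ofLex x).2) h1
        simpa using h2
      rw [chanRank, chanRank] at hr
      obtain ⟨ka, hka⟩ := Option.isSome_iff_exists.mp ((PySem.List.index?_isSome_iff oc a).mpr haoc)
      obtain ⟨kb, hkb⟩ := Option.isSome_iff_exists.mp ((PySem.List.index?_isSome_iff oc b).mpr hboc)
      obtain ⟨hlta, hgeta, _⟩ := PySem.List.getElem_of_index?_eq_some hka
      obtain ⟨hltb, hgetb, _⟩ := PySem.List.getElem_of_index?_eq_some hkb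
      rw [hka, hkb] at hr
      simp only [Option.getD_some] at hr
      have : ka = kb := by exact_mod_cast hr
      subst this
      rw [← hgeta, ← hgetb]
    · exact PySem.List.sorted_pairwise oc (keyA oc cn cl)
    · -- pairwise on the bucket concatenation
      rw [List.pairwise_flatMap]
      constructor
      · intro k _
        rw [List.pairwise_flatMap]
        constructor
        · intro c _
          rw [List.pairwise_replicate]
          right
          exact le_refl _
        · have hpw := (dedup_pairwise_rank oc).filter (fun ch => K ch == k)
          refine List.Pairwise.imp_of_mem ?_ hpw
          intro c c' hc hc' hcc x hx y hy
          rw [List.eq_of_mem_replicate hx, List.eq_of_mem_replicate hy]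
          have hkc : K c = k := by have := List.of_mem_filter hc; simpa using this
          have hkc' : K c' = k := by have := List.of_mem_filter hc'; simpa using this
          apply keyA_le_of_eq_lt oc cn cl c c' (by rw [hK] at hkc hkc'; rw [hkc, hkc'])
          rw [chanRank, chanRank]
          exact_mod_cast hcc
      · -- between buckets: keys strictly increase
        have hnodup : sk.Nodup := ((PySem.List.sorted_perm _ _ _).nodup_iff).mpr (PySem.Set.nodup_ofList _)
        have hple : sk.Pairwise (fun k k' => toLex (k.1, k.2) ≤ toLex (k'.1, k'.2)) :=
          PySem.List.sorted_pairwise ks (fun k => toLex (k.1, k.2))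
        have hcomb := hple.and hnodup
        refine List.Pairwise.imp_of_mem ?_ hcomb
        intro k k' _ _ hkk
        obtain ⟨hle, hne⟩ := hkk
        intro x hx y hy
        rw [List.mem_flatMap] at hx hy
        obtain ⟨c, hc, hx⟩ := hx
        obtain ⟨c', hc', hy⟩ := hy
        rw [List.eq_of_mem_replicate hx, List.eq_of_mem_replicate hy]
        have hkc : K c = k := by have := List.of_mem_filter hc; simpa using this
        have hkc' : K c' = k' := by have := List.of_mem_filter hc'; simpa using this
        have hlt : toLex (k.1, k.2) < toLex (k'.1, k'.2) := by
          apply lt_of_le_of_ne hle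
          intro hcon
          exact hne (Prod.ext (congrArg (fun p => (ofLex p).1) hcon) (congrArg (fun p => (ofLex p).2) hcon))
        apply keyA_le_of_key_lt
        rw [hK] at hkc hkc'
        rw [hkc, hkc']
        exact hlt
    · -- permutation
      have p1 : (PySem.List.sorted oc (keyA oc cn cl) false).Perm oc := PySem.List.sorted_perm _ _ _
      have p2 : sk.Perm ks := PySem.List.sorted_perm _ _ _
      have p3 : (sk.flatMap (fun k => (D.filter (fun ch => K ch == k)).flatMap rep)).Perm
          (ks.flatMap (fun k => (D.filter (fun ch => K ch == k)).flatMap rep)) := by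
        rw [List.flatMap_def, List.flatMap_def]
        exact (p2.map _).flatten
      have p4 : (ks.flatMap (fun k => (D.filter (fun ch => K ch == k)).flatMap rep)) =
          ((ks.flatMap (fun k => D.filter (fun ch => K ch == k))).flatMap rep) := by
        rw [List.flatMap_assoc]
      have p5 : (ks.flatMap (fun k => D.filter (fun ch => K ch == k))).Perm D := by
        apply groups_perm K ks D (PySem.Set.nodup_ofList _)
        intro c hcD
        rw [hks, PySem.Set.mem_ofList]
        exact List.mem_map_of_mem hcD
      have p6 : ((ks.flatMap (fun k => D.filter (fun ch => K ch == k))).flatMap rep).Perm (D.flatMap rep) := by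
        rw [List.flatMap_def, List.flatMap_def]
        exact (p5.map _).flatten
      have p7 : (D.flatMap rep).Perm oc :=
        rep_perm oc D (PySem.Set.nodup_ofList _) hmemD
      exact p1.trans ((p3.trans (p4 ▸ (p6.trans p7))).symm)
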